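-- pv_equiv track=rewrite | github.com/rebant23/Posit-and-float16 | posit16.py | encode_posit16
-- ===== SOURCE A (Python) =====
-- def encode_posit16(sign, scale, mantissa, es):
--     if mantissa == 0:
--         return 0
--
--     # normalize mantissa
--     while mantissa >= (1 << 15):
--         mantissa >>= 1
--         scale += 1
--
--     while mantissa < (1 << 14):
--         mantissa <<= 1
--         scale -= 1
--
--     k = scale >> es
--     exp = scale & ((1 << es) - 1)
--
--     # regime
--     if k >= 0:
--         regime_bits = ('1' * (k + 1)) + '0'
--     else:
--         regime_bits = ('0' * (-k)) + '1'
--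
--     exp_bits = format(exp, f'0{es}b') if es > 0 else ''
--     frac_bits = format(mantissa & ((1 << 14) - 1), '014b')
--
--     posit_bits = regime_bits + exp_bits + frac_bits
--     posit_bits = posit_bits[:15].ljust(15, '0')
--
--     posit = int(posit_bits, 2)
--
--     if sign < 0:
--         posit = (~posit + 1) & 0xFFFF
--
--     return posit
-- ===== SOURCE B (Python) =====
-- def encode_posit16(sign, scale, mantissa, es):
--     if mantissa == 0:
--         return 0
--
--     # normalize mantissa (same normalization as the original)
--     while mantissa >= (1 << 15):
--         mantissa >>= 1
--         scale += 1
--     while mantissa < (1 << 14):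
--         mantissa <<= 1
--         scale -= 1
--
--     k = scale >> es
--     exp = scale % (1 << es)
--
--     # regime encoded arithmetically: k+1 ones then a zero, or -k zeros then a one
--     if k >= 0:
--         regime = (1 << (k + 2)) - 2
--         rlen = k + 2
--     else:
--         regime = 1
--         rlen = 1 - k
--
--     # pack regime | exponent | fraction; total length is always >= 16,
--     # so posit_bits[:15] is a right shift and ljust never pads
--     value = regime * (1 << (es + 14)) + exp * (1 << 14) + mantissa % (1 << 14)
--     L = rlen + es + 14
--     posit = value >> (L - 15)
--
--     if sign < 0:
--         posit = (65536 - posit) % 65536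
--
--     return posit
-- ===== Notes on version B (the rewrite author's own statement) =====
-- stated objective: simpler
-- what changed: All string building/parsing (regime string, format(...,'b'), slicing, ljust, int(bits,2)) is replaced by integer arithmetic: the regime is 2^(k+2)-2 or 1 with a tracked bit length, the fields are packed as regime*2^(es+14)+exp*2^14+frac, and the [:15].ljust(15,'0') step becomes a single right shift by L-15 (the total length L is always >= 16).
import Mathlib
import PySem

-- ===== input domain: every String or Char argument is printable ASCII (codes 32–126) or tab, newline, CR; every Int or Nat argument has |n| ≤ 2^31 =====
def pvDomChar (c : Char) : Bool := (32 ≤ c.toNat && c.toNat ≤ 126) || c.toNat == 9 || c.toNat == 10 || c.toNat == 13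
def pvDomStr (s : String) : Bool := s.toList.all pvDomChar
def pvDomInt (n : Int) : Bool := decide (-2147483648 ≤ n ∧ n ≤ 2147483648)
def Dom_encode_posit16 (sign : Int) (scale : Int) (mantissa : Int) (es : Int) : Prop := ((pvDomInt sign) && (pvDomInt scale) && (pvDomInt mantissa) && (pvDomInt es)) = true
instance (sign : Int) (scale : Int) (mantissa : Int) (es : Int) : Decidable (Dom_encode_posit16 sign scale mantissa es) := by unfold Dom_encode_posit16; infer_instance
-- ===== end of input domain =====

-- B replaces all string building/parsing by integer arithmetic (objective: simpler).

-- ===== PORT A =====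
-- A's string machinery is ported on Lean Strings (runtime-compact like Python's str);
-- each builder's character sequence is characterised exactly by the lemmas below.
-- 'c' * n (string repetition), built by doubling; exact
def pvRep (c : Char) (n : Nat) : String :=
  if _h : n = 0 then "" else
    let half := pvRep c (n / 2)
    let d := half ++ half
    if n % 2 = 1 then d.push c else d
decreasing_by exact Nat.div_lt_self (by omega) (by omega)

-- format(n, f'0{w}b') for n < 2^w: the w binary digits of n, most significant first,
-- by divide-and-conquer on the width with all-zeros/all-ones run shortcuts; exact on n < 2^w
def pvBinPadS (w n : Nat) : String :=
  if _h0 : w = 0 then ""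
  else if n = 0 then pvRep '0' w
  else if n = 1 <<< w - 1 then pvRep '1' w
  else if _h1 : w = 1 then String.push "" (if n % 2 = 1 then '1' else '0')
  else
    let h := w / 2
    let ph := 1 <<< h
    pvBinPadS (w - h) (n / ph) ++ pvBinPadS h (n % ph)
decreasing_by all_goals omega

-- int(bits, 2) on the chars of a '0'/'1' string; exact
def pvParseBin (cs : List Char) : Nat :=
  cs.foldl (fun a c => 2 * a + (if c = '1' then 1 else 0)) 0

-- 'while mantissa >= (1 << 15): mantissa >>= 1; scale += 1' (mantissa > 0 on Pre_, as Nat)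
def pvNormUp (m : Nat) (s : Int) : Nat × Int :=
  if 2 ^ 15 ≤ m then pvNormUp (m / 2) (s + 1) else (m, s)
decreasing_by exact Nat.div_lt_self (by omega) (by omega)

-- 'while mantissa < (1 << 14): mantissa <<= 1; scale -= 1'; fuel 15 only makes the
-- loop total: on Pre_ (m ≥ 1 after pvNormUp) at most 14 iterations ever run.
def pvNormDown : Nat → Nat → Int → Nat × Int
  | 0, m, s => (m, s)
  | f + 1, m, s => if m < 2 ^ 14 then pvNormDown f (m * 2) (s - 1) else (m, s)

-- the string-built magnitude: regime/exponent/fraction strings, [:15].ljust(15,'0'), int(.,2)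
def pvPositA (s : Int) (es : Int) (m : Nat) : Nat :=
  let e := es.toNat                      -- es ≥ 0 on Pre_ (Python raises for es < 0)
  let pe : Int := ((1 <<< e : Nat) : Int)    -- 1 << es
  let k := PySem.Int.floordiv s pe       -- scale >> es (arithmetic shift = floor division)
  let ex := (PySem.Int.mod s pe).toNat   -- scale & ((1<<es)-1) = scale mod 2^es (exact)
  let regime : String :=
    if 0 ≤ k then pvRep '1' (k + 1).toNat ++ String.push "" '0'
    else pvRep '0' (-k).toNat ++ String.push "" '1'
  let expBits : String := if 0 < es then pvBinPadS e ex else ""   -- format(exp, f'0{es}b'), exp < 2^es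
  let fracBits : String := pvBinPadS 14 (m % 2 ^ 14)              -- format(mantissa & 0x3FFF, '014b')
  let bits := regime ++ expBits ++ fracBits
  let t := String.Legacy.take bits 15                 -- posit_bits[:15]
  let bits15 := t ++ pvRep '0' (15 - t.length)        -- .ljust(15, '0')
  pvParseBin bits15.toList                            -- int(posit_bits, 2)

def encode_posit16 (sign : Int) (scale : Int) (mantissa : Int) (es : Int) : Int :=
  if mantissa = 0 then 0
  else
    let p := pvNormUp mantissa.toNat scale
    let q := pvNormDown 15 p.1 p.2
    let posit : Int := (pvPositA q.2 es q.1 : Nat)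
    if sign < 0 then PySem.Int.mod (-posit - 1 + 1) 65536 else posit  -- (~posit + 1) & 0xFFFF

-- ===== PORT B =====
-- the arithmetically packed magnitude: regime as an integer plus its bit length, shift
def pvPositB (s : Int) (es : Int) (m : Nat) : Nat :=
  let e := es.toNat
  let pe : Int := ((1 <<< e : Nat) : Int)    -- 1 << es
  let k := PySem.Int.floordiv s pe           -- scale >> es
  let ex := (PySem.Int.mod s pe).toNat       -- scale % (1 << es)
  let rp : Nat × Nat :=
    if 0 ≤ k then (1 <<< (k + 2).toNat - 2, (k + 2).toNat) else (1, (1 - k).toNat)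
  let value : Nat := rp.1 * 1 <<< (e + 14) + ex * (1 <<< 14) + m % (1 <<< 14)
  let L : Nat := rp.2 + e + 14
  value / 1 <<< (L - 15)                     -- value >> (L - 15), value ≥ 0

def encode_posit16_alt (sign : Int) (scale : Int) (mantissa : Int) (es : Int) : Int :=
  if mantissa = 0 then 0
  else
    let p := pvNormUp mantissa.toNat scale
    let q := pvNormDown 15 p.1 p.2
    let posit : Int := (pvPositB q.2 es q.1 : Nat)
    if sign < 0 then (65536 - posit) % 65536 else posit

-- ===== PRECONDITION & SPEC =====
-- Pre_ excludes exactly the inputs on which A does not return a value: with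
-- mantissa ≠ 0, a negative mantissa makes A's second while-loop diverge (mantissa
-- stays negative forever), and a negative es makes '1 << es' raise ValueError.
-- B behaves identically on those inputs. Wherever A returns, Pre_ holds.
def Pre_encode_posit16 (sign : Int) (scale : Int) (mantissa : Int) (es : Int) : Prop :=
  0 ≤ mantissa ∧ (mantissa = 0 ∨ 0 ≤ es)
instance (sign : Int) (scale : Int) (mantissa : Int) (es : Int) : Decidable (Pre_encode_posit16 sign scale mantissa es) := by unfold Pre_encode_posit16; infer_instance

def pvWitness_encode_posit16 : Int × Int × Int × Int := (1, 0, 1, 2)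

def Spec_encode_posit16 (sign : Int) (scale : Int) (mantissa : Int) (es : Int) (out : Int) : Prop := out = encode_posit16_alt sign scale mantissa es
instance (sign : Int) (scale : Int) (mantissa : Int) (es : Int) (out : Int) : Decidable (Spec_encode_posit16 sign scale mantissa es out) := by unfold Spec_encode_posit16; infer_instance

-- ===== CLAIM (what is proved, stated in full; the proofs are below) =====
def Claim_equal_encode_posit16 : Prop := ∀ (sign : Int) (scale : Int) (mantissa : Int) (es : Int), Dom_encode_posit16 sign scale mantissa es → Pre_encode_posit16 sign scale mantissa es → Spec_encode_posit16 sign scale mantissa es (encode_posit16 sign scale mantissa es)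

-- ===== LEMMAS AND PROOFS =====

theorem pvParseBin_foldl (cs : List Char) (a : Nat) :
    cs.foldl (fun a c => 2 * a + (if c = '1' then 1 else 0)) a
      = a * 2 ^ cs.length + pvParseBin cs := by
  induction cs generalizing a with
  | nil => simp [pvParseBin]
  | cons c cs ih =>
    simp only [List.foldl_cons, List.length_cons, pvParseBin] at *
    rw [ih, ih (2 * 0 + _)]
    ring

theorem pvParseBin_append (xs ys : List Char) :
    pvParseBin (xs ++ ys) = pvParseBin xs * 2 ^ ys.length + pvParseBin ys := by
  simp only [pvParseBin, List.foldl_append]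
  exact pvParseBin_foldl ys _

theorem pvParseBin_cons (c : Char) (cs : List Char) :
    pvParseBin (c :: cs) = (if c = '1' then 1 else 0) * 2 ^ cs.length + pvParseBin cs := by
  simp only [pvParseBin, List.foldl_cons]
  rw [pvParseBin_foldl cs (2 * 0 + (if c = '1' then 1 else 0))]
  simp [pvParseBin]

theorem pvParseBin_lt (cs : List Char) : pvParseBin cs < 2 ^ cs.length := by
  induction cs with
  | nil => simp [pvParseBin]
  | cons c cs ih =>
    rw [pvParseBin_cons, List.length_cons, pow_succ]
    split <;> omega

theorem pvParseBin_replicate_one (n : Nat) :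
    pvParseBin (List.replicate n '1') = 2 ^ n - 1 := by
  induction n with
  | zero => simp [pvParseBin]
  | succ n ih =>
    rw [List.replicate_succ, pvParseBin_cons, List.length_replicate, ih,
        if_pos rfl, pow_succ]
    have h1 : 1 ≤ (2:Nat) ^ n := Nat.one_le_two_pow
    omega

theorem pvParseBin_replicate_zero (n : Nat) :
    pvParseBin (List.replicate n '0') = 0 := by
  induction n with
  | zero => simp [pvParseBin]
  | succ n ih =>
    rw [List.replicate_succ, pvParseBin_cons, List.length_replicate, ih,
        if_neg (by decide)]
    simp

theorem pvRep_toList (c : Char) (n : Nat) : (pvRep c n).toList = List.replicate n c := by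
  induction n using Nat.strong_induction_on with
  | _ n ih =>
    rw [pvRep]
    by_cases h : n = 0
    · simp [h]
    · rw [dif_neg h]
      have hh := ih (n / 2) (Nat.div_lt_self (by omega) (by omega))
      have h2 := Nat.mod_two_eq_zero_or_one n
      rcases h2 with h2 | h2
      · rw [if_neg (by omega)]
        simp only [String.toList_append, hh, ← List.replicate_add]
        congr 1
        omega
      · rw [if_pos h2]
        simp only [String.toList_push, String.toList_append, hh, ← List.replicate_succ',
          ← List.replicate_add]
        congr 1
        omega

theorem pvTakeS_toList (s : String) (n : Nat) :
    (String.Legacy.take s n).toList = s.toList.take n := by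
  simp [String.toList_take]

-- pvBinPadS is exactly the zero-padded binary expansion: w digits whose value is n
theorem pvBinPadS_spec (w n : Nat) (h : n < 2 ^ w) :
    pvParseBin (pvBinPadS w n).toList = n ∧ (pvBinPadS w n).toList.length = w := by
  induction w using Nat.strong_induction_on generalizing n with
  | _ w ih =>
    rw [pvBinPadS]
    simp only [Nat.shiftLeft_eq, one_mul]
    by_cases h0 : w = 0
    · subst h0
      have : n = 0 := by simpa using h
      simp [this, pvParseBin]
    rw [dif_neg h0]
    by_cases hn0 : n = 0
    · rw [if_pos hn0, pvRep_toList]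
      simp [pvParseBin_replicate_zero, hn0]
    rw [if_neg hn0]
    by_cases hn1 : n = 2 ^ w - 1
    · rw [if_pos hn1, pvRep_toList]
      simp [pvParseBin_replicate_one, hn1]
    rw [if_neg hn1]
    by_cases h1 : w = 1
    · exfalso
      subst h1
      omega
    rw [dif_neg h1]
    have hh1 : 1 ≤ w / 2 := by omega
    have hh2 : w / 2 < w := by omega
    have hlo := ih (w / 2) hh2 (n % 2 ^ (w / 2)) (Nat.mod_lt _ (Nat.two_pow_pos _))
    have hhi : n / 2 ^ (w / 2) < 2 ^ (w - w / 2) := by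
      have : 2 ^ (w - w / 2) * 2 ^ (w / 2) = 2 ^ w := by
        rw [← pow_add]; congr 1; omega
      rcases Nat.lt_or_ge (n / 2 ^ (w / 2)) (2 ^ (w - w / 2)) with hlt | hge
      · exact hlt
      · exfalso
        have := Nat.div_mul_le_self n (2 ^ (w / 2))
        have h2 := Nat.mul_le_mul_right (2 ^ (w / 2)) hge
        omega
    have hhiS := ih (w - w / 2) (by omega) (n / 2 ^ (w / 2)) hhi
    simp only [String.toList_append, pvParseBin_append, List.length_append,
      hlo.1, hlo.2, hhiS.1, hhiS.2]
    constructor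
    · exact Nat.div_add_mod' n (2 ^ (w / 2))
    · omega

-- truncation to the first 15 bits is division
theorem pvTake15 (cs : List Char) :
    pvParseBin (cs.take 15) = pvParseBin cs / 2 ^ (cs.length - 15) := by
  have hsplit : cs = cs.take 15 ++ cs.drop 15 := (List.take_append_drop 15 cs).symm
  have hlen : (cs.drop 15).length = cs.length - 15 := by simp
  have hparse : pvParseBin cs
      = pvParseBin (cs.take 15) * 2 ^ (cs.length - 15) + pvParseBin (cs.drop 15) := by
    conv_lhs => rw [hsplit]
    rw [pvParseBin_append, hlen]
  have hlt : pvParseBin (cs.drop 15) < 2 ^ (cs.length - 15) := by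
    have := pvParseBin_lt (cs.drop 15); rwa [hlen] at this
  rw [hparse, Nat.add_comm,
      Nat.add_mul_div_right _ _ (Nat.two_pow_pos _),
      Nat.div_eq_of_lt hlt]
  omega

-- the core: string-built posit value = arithmetic posit value (before the sign flip)
theorem pvCore (s : Int) (es : Int) (m : Nat) (hes : 0 ≤ es) :
    pvPositA s es m = pvPositB s es m := by
  unfold pvPositA pvPositB
  simp only [Nat.shiftLeft_eq, one_mul, Nat.cast_pow, Nat.cast_ofNat]
  set e := es.toNat with he
  set k := PySem.Int.floordiv s (2 ^ e) with hk
  set ex := (PySem.Int.mod s (2 ^ e)).toNat with hex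
  -- bring every string builder down to its List Char image
  have hR : (if 0 ≤ k then pvRep '1' (k + 1).toNat ++ String.push "" '0'
        else pvRep '0' (-k).toNat ++ String.push "" '1').toList
      = (if 0 ≤ k then List.replicate (k + 1).toNat '1' ++ ['0']
        else List.replicate (-k).toNat '0' ++ ['1']) := by
    split <;> simp [String.toList_append, pvRep_toList]
  rw [String.toList_append, pvRep_toList, ← String.length_toList, pvTakeS_toList,
      String.toList_append, String.toList_append, hR]
  -- bound on the exponent field
  have hpow : (0:Int) < 2 ^ e := by positivity
  have hexlt : ex < 2 ^ e := by
    have h1 := PySem.Int.mod_eq_emod_of_pos (a := s) hpow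
    have h2 := Int.emod_nonneg s (by omega : (2:Int) ^ e ≠ 0)
    have h3 := Int.emod_lt_of_pos s hpow
    rw [hex, h1]
    have : ((s % 2 ^ e).toNat : Int) < ((2:Int) ^ e) := by
      rw [Int.toNat_of_nonneg h2]; exact h3
    have hcast : ((2:Int) ^ e) = ((2 ^ e : Nat) : Int) := by push_cast; ring
    rw [hcast] at this
    exact_mod_cast this
  -- exponent field: parse = ex, length = e (both cases)
  have hexp : pvParseBin (if 0 < es then pvBinPadS e ex else ("":String)).toList = ex ∧
      ((if 0 < es then pvBinPadS e ex else ("":String)).toList).length = e := by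
    by_cases hpos : 0 < es
    · rw [if_pos hpos]
      exact pvBinPadS_spec e ex hexlt
    · have he0 : e = 0 := by omega
      rw [if_neg hpos]
      rw [he0] at hexlt
      simp only [String.toList_empty, List.length_nil]
      exact ⟨by simp [pvParseBin]; omega, he0.symm⟩
  -- fraction field
  have hfrac := pvBinPadS_spec 14 (m % 2 ^ 14) (Nat.mod_lt _ (by omega))
  -- regime field
  set rp : Nat × Nat :=
    if 0 ≤ k then (2 ^ (k + 2).toNat - 2, (k + 2).toNat) else (1, (1 - k).toNat) with hrp
  set regime : List Char :=
    if 0 ≤ k then List.replicate (k + 1).toNat '1' ++ ['0']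
    else List.replicate (-k).toNat '0' ++ ['1'] with hreg
  have hregime : pvParseBin regime = rp.1 ∧ regime.length = rp.2 ∧ 2 ≤ rp.2 := by
    by_cases hk0 : 0 ≤ k
    · rw [hreg, hrp, if_pos hk0, if_pos hk0]
      refine ⟨?_, by simp; omega, by simp; omega⟩
      rw [pvParseBin_append, pvParseBin_replicate_one]
      have : pvParseBin ['0'] = 0 := by simp [pvParseBin]
      rw [this]
      have h21 : (k + 2).toNat = (k + 1).toNat + 1 := by omega
      have h1 : 1 ≤ (2:Nat) ^ (k + 1).toNat := Nat.one_le_two_pow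
      simp only [List.length_cons, List.length_nil, h21, pow_succ]
      omega
    · rw [hreg, hrp, if_neg hk0, if_neg hk0]
      refine ⟨?_, by simp; omega, by simp; omega⟩
      rw [pvParseBin_append, pvParseBin_replicate_zero]
      simp [pvParseBin]
  obtain ⟨hr1, hr2, hr3⟩ := hregime
  -- the full bit string
  set bits := regime ++ (if 0 < es then pvBinPadS e ex else ("":String)).toList ++
      (pvBinPadS 14 (m % 2 ^ 14)).toList with hbits
  have hlen : bits.length = rp.2 + e + 14 := by
    rw [hbits]
    simp only [List.length_append, hr2, hexp.2, hfrac.2]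
  have hparse : pvParseBin bits = rp.1 * 2 ^ (e + 14) + ex * 2 ^ 14 + m % 2 ^ 14 := by
    rw [hbits, pvParseBin_append, pvParseBin_append, hr1, hexp.1, hfrac.1,
        hexp.2, hfrac.2, pow_add]
    ring
  have htake : (bits.take 15).length = 15 := by
    rw [List.length_take]; omega
  rw [htake]
  simp only [Nat.sub_self, List.replicate_zero, List.append_nil]
  rw [pvTake15 bits, hparse, hlen]

-- ===== VERDICT (by name: the statement is the Claim_ definition above) =====
theorem encode_posit16_spec : Claim_equal_encode_posit16 := by
  intro sign scale mantissa es _ hpre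
  obtain ⟨hm0, hrest⟩ := hpre
  unfold Spec_encode_posit16
  by_cases hz : mantissa = 0
  · simp [encode_posit16, encode_posit16_alt, hz]
  · have hes : 0 ≤ es := by tauto
    have hcore := pvCore
      (pvNormDown 15 (pvNormUp mantissa.toNat scale).1 (pvNormUp mantissa.toNat scale).2).2 es
      (pvNormDown 15 (pvNormUp mantissa.toNat scale).1 (pvNormUp mantissa.toNat scale).2).1
      hes
    simp only [encode_posit16, encode_posit16_alt, if_neg hz, hcore]
    by_cases hs : sign < 0
    · rw [if_pos hs, if_pos hs, PySem.Int.mod_eq_emod_of_pos (by norm_num)]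
      omega
    · rw [if_neg hs, if_neg hs]
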